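-- pv_equiv track=rewrite | github.com/Sharna2002/4_Month_DataScientist_Journey_ | Day -08/TheStringBuilder.py | add_char
-- ===== SOURCE A (Python) =====
-- def add_char(old_string,char):
--     old_size = len(old_string)
--     new_size = old_size + 1
--
--     new_memory = malloc(new_size)
--
--     for i in range(old_size):
--         new_memory[i] = old_string[i]
--
--     new_memory[old_size] = char
--     return "".join(new_memory)
--
-- def malloc(new_size):
--     return ['']*new_size
-- ===== SOURCE B (Python) =====
-- def add_char(old_string, char):
--     return old_string + char
-- ===== Notes on version B (the rewrite author's own statement) =====
-- stated objective: simpler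
-- what changed: Replaces the preallocated buffer, index-copy loop and join with a single string concatenation.
import Mathlib
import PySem

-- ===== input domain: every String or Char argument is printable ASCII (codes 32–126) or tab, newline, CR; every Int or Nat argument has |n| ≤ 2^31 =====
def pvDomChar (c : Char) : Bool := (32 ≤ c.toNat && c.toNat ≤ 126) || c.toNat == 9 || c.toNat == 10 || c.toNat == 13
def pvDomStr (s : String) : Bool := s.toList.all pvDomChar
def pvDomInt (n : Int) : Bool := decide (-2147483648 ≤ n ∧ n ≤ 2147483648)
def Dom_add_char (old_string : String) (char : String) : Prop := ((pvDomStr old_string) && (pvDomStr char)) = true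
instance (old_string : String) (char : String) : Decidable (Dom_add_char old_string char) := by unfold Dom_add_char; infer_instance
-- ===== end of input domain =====

-- B replaces A's preallocated buffer, index-copy loop and join by a single concatenation (simpler).

-- ===== PORT A =====
-- malloc(new_size) = ['']*new_size; Python str elements become List Char here
def malloc (new_size : Int) : List (List Char) :=
  List.replicate new_size.toNat []

def add_char (old_string : String) (char : String) : String :=
  let cs := old_string.toList
  let old_size : Int := PySem.Str.len old_string
  let new_size : Int := old_size + 1
  let new_memory := malloc new_size
  -- for i in range(old_size): new_memory[i] = old_string[i]
  -- old_string[i] is a one-char string; modelled as the singleton char list (exact: i is in range)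
  let new_memory := (PySem.List.pyRange 0 old_size 1).foldl
      (fun mem i => PySem.List.pySetD mem i (((PySem.List.pyGet? cs i).map (fun c => [c])).getD [])) new_memory
  let new_memory := PySem.List.pySetD new_memory old_size char.toList
  String.ofList (PySem.Chars.join [] new_memory)

-- ===== PORT B =====
-- Source B: return old_string + char  (Python str concatenation, exact on code points)
def add_char_alt (old_string : String) (char : String) : String :=
  String.ofList (old_string.toList ++ char.toList)

-- ===== PRECONDITION & SPEC =====
def Spec_add_char (old_string : String) (char : String) (out : String) : Prop := out = add_char_alt old_string char
instance (old_string : String) (char : String) (out : String) : Decidable (Spec_add_char old_string char out) := by unfold Spec_add_char; infer_instance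

-- ===== CLAIM (what is proved, stated in full; the proofs are below) =====
def Claim_equal_add_char : Prop := ∀ (old_string : String) (char : String), Dom_add_char old_string char → Spec_add_char old_string char (add_char old_string char)

-- ===== LEMMAS AND PROOFS =====

-- join with the empty separator is flatten
theorem join_nil_eq_flatten (parts : List (List Char)) :
    PySem.Chars.join [] parts = parts.flatten := by
  induction parts with
  | nil => simp [PySem.Chars.join_nil]
  | cons p rest ih =>
    cases rest with
    | nil => simp [PySem.Chars.join_singleton]
    | cons q t =>
      rw [PySem.Chars.join_cons_cons]
      simp [ih]

-- the copy loop fills the first k cells of the fresh buffer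
theorem fill_loop (cs : List Char) (k : Nat) (hk : k ≤ cs.length) :
    (PySem.List.pyRange 0 (k : Int) 1).foldl
      (fun mem i => PySem.List.pySetD mem i (((PySem.List.pyGet? cs i).map (fun c => [c])).getD []))
      (List.replicate (cs.length + 1) ([] : List Char))
    = (cs.take k).map (fun c => [c]) ++ List.replicate (cs.length + 1 - k) [] := by
  induction k with
  | zero => simp [PySem.List.pyRange]
  | succ k ih =>
    have hk' : k ≤ cs.length := Nat.le_of_succ_le hk
    have hrange : PySem.List.pyRange 0 ((k : Int) + 1) 1
        = PySem.List.pyRange 0 (k : Int) 1 ++ [(k : Int)] :=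
      PySem.List.pyRange_one_succ_right (by exact_mod_cast Nat.zero_le k)
    have : ((k + 1 : Nat) : Int) = (k : Int) + 1 := by push_cast; ring
    rw [this, hrange, List.foldl_append, ih hk']
    simp only [List.foldl_cons, List.foldl_nil]
    have hklt : k < cs.length := hk
    rw [PySem.List.pyGet?_natCast]
    rw [PySem.List.pySetD_natCast]
    have hlen : ((cs.take k).map (fun c => [c])).length = k := by
      simp [List.length_take, Nat.min_eq_left hk']
    rw [List.set_append]
    have hrep : cs.length + 1 - k = (cs.length - k) + 1 := by omega
    rw [hlen]
    simp only [lt_irrefl, if_false, Nat.sub_self]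
    rw [hrep, List.replicate_succ, List.set_cons_zero]
    have htake : cs.take (k + 1) = cs.take k ++ [cs[k]] := by
      rw [List.take_add_one]
      simp [List.getElem?_eq_getElem hklt]
    rw [htake]
    have hsub : cs.length + 1 - (k + 1) = cs.length - k := by omega
    simp only [List.map_append, List.map_cons, List.map_nil, hsub,
      List.getElem?_eq_getElem hklt, Option.map_some, Option.getD_some,
      List.append_assoc, List.singleton_append]

theorem flatten_map_singleton (cs : List Char) :
    (cs.map (fun c => [c])).flatten = cs := by
  induction cs with
  | nil => simp
  | cons c t ih => simp [ih]

theorem add_char_eq (old_string char : String) :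
    add_char old_string char = add_char_alt old_string char := by
  unfold add_char add_char_alt malloc
  simp only [PySem.Str.len_eq]
  have h := fill_loop old_string.toList old_string.toList.length (le_refl _)
  have hcast : ((old_string.toList.length : Int) + 1).toNat = old_string.toList.length + 1 := by
    simp
  rw [hcast, h]
  rw [PySem.List.pySetD_natCast]
  have hlen : ((old_string.toList.take old_string.toList.length).map (fun c => [c])).length
      = old_string.toList.length := by simp
  rw [List.set_append, hlen]
  have h1 : old_string.toList.length + 1 - old_string.toList.length = 1 := by omega
  simp only [lt_irrefl, if_false, List.take_length, h1, Nat.sub_self,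
    List.replicate_one, List.set_cons_zero]
  rw [join_nil_eq_flatten]
  simp only [List.flatten_append, List.flatten_cons, List.flatten_nil,
    flatten_map_singleton, List.append_nil]

-- ===== VERDICT (by name: the statement is the Claim_ definition above) =====
theorem add_char_spec : Claim_equal_add_char := by
  intro old_string char _
  exact add_char_eq old_string char
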